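-- pv_equiv track=rewrite | github.com/ihalseide/format-s | format_s.py | pack_strings
-- ===== SOURCE A (Python) =====
-- def pack_strings (strings: list):
--     '''Pack a list of strings into a single string'''
--
--     # Save the indices and lengths of each string
--     indices = [None for _ in strings]
--     lengths = [len(x) for x in strings]
--     i_strings = enumerate(strings)
--
--     # Pack together the strings
--     # Start with the longest because only a longer string can contain a shorter string
--     k = lambda e: len(e[1])
--     pack = ''
--     longest_first = reversed(sorted(i_strings, key=k))
--     for i, s in longest_first:
--         find = pack.find(s)
--         if find == -1: # not found
--             indices[i] = len(pack)
--             pack += s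
--         else:
--             indices[i] = find
--
--     return indices, lengths, pack
-- ===== SOURCE B (Python) =====
-- def pack_strings (strings: list):
--     '''Pack a list of strings into a single string'''
--     n = len(strings)
--     lengths = [len(s) for s in strings]
--     # one explicit order list: reversed(stable sort by length) == stable sort of the
--     # descending index range by descending length
--     order = sorted(range(n - 1, -1, -1), key=lambda i: -lengths[i])
--     indices = [0] * n
--     pack = []           # packed text as a list of characters
--     occ = {}            # char -> ascending list of positions in pack holding that char
--     for i in order:
--         s = strings[i]
--         m = len(s)
--         if m == 0:
--             indices[i] = 0
--             continue
--         f = -1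
--         for p in occ.get(s[0], []):   # only positions where the first char matches
--             if pack[p:p + m] == list(s):
--                 f = p
--                 break
--         if f == -1:
--             base = len(pack)
--             indices[i] = base
--             for j, c in enumerate(s):
--                 occ.setdefault(c, []).append(base + j)
--             pack.extend(s)
--         else:
--             indices[i] = f
--     return indices, lengths, ''.join(pack)
-- ===== Notes on version B (the rewrite author's own statement) =====
-- stated objective: alternative
-- what changed: B precomputes the processing order once (stable sort of the descending index range by descending length) and replaces each full-text pack.find(s) scan by a maintained first-character position index (char -> ascending positions) queried with explicit slice comparisons; indices/lengths/pack are proved identical.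
import Mathlib
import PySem

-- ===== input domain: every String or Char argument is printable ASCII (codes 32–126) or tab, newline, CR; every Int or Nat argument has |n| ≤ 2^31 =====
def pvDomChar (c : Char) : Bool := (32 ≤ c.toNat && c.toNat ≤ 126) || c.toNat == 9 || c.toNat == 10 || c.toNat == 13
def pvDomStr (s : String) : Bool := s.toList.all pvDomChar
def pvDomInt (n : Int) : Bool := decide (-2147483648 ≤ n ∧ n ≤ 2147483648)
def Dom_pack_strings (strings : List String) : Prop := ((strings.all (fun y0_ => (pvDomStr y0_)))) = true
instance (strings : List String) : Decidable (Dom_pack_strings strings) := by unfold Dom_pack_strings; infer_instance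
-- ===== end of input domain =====

-- B replaces A's repeated full-text pack.find scans by a maintained first-character
-- position index with explicit slice comparison, and one precomputed processing order
-- (objective: alternative; the return value is proved identical).

-- ===== PORT A =====
-- loop body of A's 'for i, s in longest_first'
def pvStepA (st : List Int × String) (e : Int × String) : List Int × String :=
  let find := PySem.Str.find st.2 e.2
  if find = -1 then (PySem.List.pySetD st.1 e.1 (PySem.Str.len st.2), st.2 ++ e.2)
  else (PySem.List.pySetD st.1 e.1 find, st.2)

def pack_strings (strings : List String) : List Int × List Int × String :=
  -- 'indices = [None for _ in strings]': Int placeholders (every slot is overwritten before return)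
  let indices0 : List Int := strings.map (fun _ => (0 : Int))
  let lengths : List Int := strings.map (fun x => PySem.Str.len x)
  let i_strings := PySem.List.enumerate strings
  let longest_first := (PySem.List.sorted i_strings (fun e => PySem.Str.len e.2)).reverse
  let r := longest_first.foldl pvStepA (indices0, "")
  (r.1, lengths, r.2)

-- ===== PORT B =====
-- Source B's inner 'for p in occ.get(s[0], []): if pack[p:p+m] == list(s): f = p; break'
def pvScan (pack s : List Char) : List Int → Int
  | [] => -1
  | p :: rest =>
    if PySem.List.slice pack (some p) (some (p + (s.length : Int))) = s then p
    else pvScan pack s rest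

-- loop body of Source B's 'for i in order' (state: indices, pack as chars, occ)
def pvStepB (strings : List String) (st : List Int × List Char × PySem.Dict Char (List Int))
    (i : Int) : List Int × List Char × PySem.Dict Char (List Int) :=
  match (PySem.List.pyGetD strings i "").toList with
  | [] => (PySem.List.pySetD st.1 i 0, st.2)
  | c :: t =>
    let f := pvScan st.2.1 (c :: t) (st.2.2.getD c [])
    if f = -1 then
      let base : Int := (st.2.1.length : Int)
      (PySem.List.pySetD st.1 i base, st.2.1 ++ (c :: t),
        (PySem.List.enumerate (c :: t)).foldl
          (fun d jc => PySem.Dict.modify d jc.2 [] (fun v => v ++ [base + jc.1])) st.2.2)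
    else (PySem.List.pySetD st.1 i f, st.2.1, st.2.2)

def pack_strings_alt (strings : List String) : List Int × List Int × String :=
  let n := strings.length
  let lengths : List Int := strings.map (fun s => PySem.Str.len s)
  -- reversed(stable sort by length) == stable sort of the descending range by descending length
  let order := PySem.List.sorted (PySem.List.pyRange ((n : Int) - 1) (-1) (-1))
    (fun i => -(PySem.List.pyGetD lengths i 0))
  let r := order.foldl (pvStepB strings) (List.replicate n 0, [], (PySem.Dict.empty : PySem.Dict Char (List Int)))
  (r.1, lengths, String.ofList r.2.1)

-- ===== PRECONDITION & SPEC =====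
def Spec_pack_strings (strings : List String) (out : List Int × List Int × String) : Prop := out = pack_strings_alt strings
instance (strings : List String) (out : List Int × List Int × String) : Decidable (Spec_pack_strings strings out) := by unfold Spec_pack_strings; infer_instance

-- ===== CLAIM (what is proved, stated in full; the proofs are below) =====
def Claim_equal_pack_strings : Prop := ∀ (strings : List String), Dom_pack_strings strings → Spec_pack_strings strings (pack_strings strings)

-- ===== LEMMAS AND PROOFS =====

-- strict "(key, idx) ascending" relation tracked through the stable sort
def pvS {α : Type} (key idx : α → Int) (a b : α) : Prop :=
  key a < key b ∨ (key a = key b ∧ idx a < idx b)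

theorem pv_insertBy_pairwise {α : Type} (key idx : α → Int) (x : α) :
    ∀ (acc : List α), acc.Pairwise (pvS key idx) → (∀ y ∈ acc, idx y < idx x) →
    (PySem.List.insertBy (fun a b => decide (key a < key b)) x acc).Pairwise (pvS key idx) := by
  intro acc
  induction acc with
  | nil => intro _ _; simp [PySem.List.insertBy, pvS]
  | cons y ys ih =>
    intro h hidx
    by_cases hxy : key x < key y
    · have hins : PySem.List.insertBy (fun a b => decide (key a < key b)) x (y :: ys)
        = x :: y :: ys := by simp [PySem.List.insertBy, hxy]
      rw [hins]
      refine List.pairwise_cons.mpr ⟨?_, h⟩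
      intro z hz
      rcases List.mem_cons.mp hz with rfl | hz'
      · exact Or.inl hxy
      · have hyz := (List.pairwise_cons.mp h).1 z hz'
        have : key y ≤ key z := by rcases hyz with h' | ⟨h', _⟩ <;> omega
        exact Or.inl (by omega)
    · have hins : PySem.List.insertBy (fun a b => decide (key a < key b)) x (y :: ys)
        = y :: PySem.List.insertBy (fun a b => decide (key a < key b)) x ys := by
        simp [PySem.List.insertBy, hxy]
      rw [hins]
      refine List.pairwise_cons.mpr ⟨?_, ih (List.pairwise_cons.mp h).2
        (fun z hz => hidx z (List.mem_cons_of_mem _ hz))⟩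
      intro z hz
      rcases (PySem.List.mem_insertBy _ _ _ _).mp hz with rfl | hz'
      · have h1 : idx y < idx z := hidx y (List.mem_cons_self)
        by_cases h2 : key y < key z
        · exact Or.inl h2
        · exact Or.inr ⟨by omega, h1⟩
      · exact (List.pairwise_cons.mp h).1 z hz'

theorem pv_foldl_pairwise {α : Type} (key idx : α → Int) :
    ∀ (xs acc : List α), xs.Pairwise (fun a b => idx a < idx b) → acc.Pairwise (pvS key idx) →
      (∀ y ∈ acc, ∀ x ∈ xs, idx y < idx x) →
      (xs.foldl (fun acc x => PySem.List.insertBy (fun a b => decide (key a < key b)) x acc) acc).Pairwise (pvS key idx) := by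
  intro xs
  induction xs with
  | nil => intro acc _ ha _; simpa using ha
  | cons x xs ih =>
    intro acc hx ha hb
    simp only [List.foldl_cons]
    refine ih _ (List.pairwise_cons.mp hx).2
      (pv_insertBy_pairwise key idx x acc ha (fun y hy => hb y hy x List.mem_cons_self)) ?_
    intro y hy z hz
    rcases (PySem.List.mem_insertBy _ _ _ _).mp hy with rfl | hy'
    · exact (List.pairwise_cons.mp hx).1 z hz
    · exact hb y hy' z (List.mem_cons_of_mem _ hz)

theorem pv_sorted_pairwise {α : Type} (key idx : α → Int) (xs : List α)
    (hx : xs.Pairwise (fun a b => idx a < idx b)) :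
    (PySem.List.sorted xs key).Pairwise (pvS key idx) := by
  rw [PySem.List.sorted_eq_foldl_insertBy]
  exact pv_foldl_pairwise key idx xs [] hx (by simp) (by simp)

theorem pv_lenD (strings : List String) (i : Int) (h0 : 0 ≤ i) (h1 : i < (strings.length : Int)) :
    PySem.List.pyGetD (strings.map (fun s => PySem.Str.len s)) i 0
      = PySem.Str.len (PySem.List.pyGetD strings i "") := by
  obtain ⟨k, rfl⟩ : ∃ k : Nat, i = (k : Int) := ⟨i.toNat, by omega⟩
  rw [PySem.List.pyGetD_natCast, PySem.List.pyGetD_natCast]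
  have hk : k < strings.length := by exact_mod_cast h1
  rw [List.getD_eq_getElem _ _ (by simpa using hk), List.getD_eq_getElem _ _ hk, List.getElem_map]

-- A's iteration order equals B's: reversed(sorted by length) = sorted descending
set_option maxHeartbeats 1000000 in
theorem pv_order (strings : List String) :
    (PySem.List.sorted (PySem.List.enumerate strings) (fun e => PySem.Str.len e.2)).reverse
      = (PySem.List.sorted (PySem.List.pyRange (((strings.length : Nat) : Int) - 1) (-1) (-1))
          (fun i => -(PySem.List.pyGetD (strings.map (fun s => PySem.Str.len s)) i 0))).map
          (fun i => (i, PySem.List.pyGetD strings i "")) := by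
  refine List.eq_of_perm_of_sorted
    (le := fun p q : Int × String => pvS (fun e => PySem.Str.len e.2) (fun e => e.1) q p)
    ?_ ?_ ?_ ?_
  · intro a b _ _ hab hba
    exfalso
    rcases hab with h | ⟨h, h'⟩ <;> rcases hba with g | ⟨g, g'⟩ <;> omega
  · rw [List.pairwise_reverse]
    exact pv_sorted_pairwise (fun e : Int × String => PySem.Str.len e.2)
      (fun e : Int × String => e.1) _ (PySem.List.pairwise_lt_enumerate strings 0)
  · rw [List.pairwise_map]
    have hx : (PySem.List.pyRange (((strings.length : Nat) : Int) - 1) (-1) (-1)).Pairwise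
        (fun a b => -a < -b) := by
      rw [PySem.List.pyRange_neg_one_eq_reverse, List.pairwise_reverse]
      exact (PySem.List.pairwise_lt_pyRange_one _ _).imp (fun h => by omega)
    have H := pv_sorted_pairwise (fun i => -(PySem.List.pyGetD (strings.map (fun s => PySem.Str.len s)) i 0))
      (fun i : Int => -i) _ hx
    refine H.imp_of_mem ?_
    intro a b ha hb hab
    have ha' : -1 < a ∧ a ≤ ((strings.length : Nat) : Int) - 1 :=
      PySem.List.mem_pyRange_neg_one.mp ((PySem.List.mem_sorted _ _ _ _).mp ha)
    have hb' : -1 < b ∧ b ≤ ((strings.length : Nat) : Int) - 1 :=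
      PySem.List.mem_pyRange_neg_one.mp ((PySem.List.mem_sorted _ _ _ _).mp hb)
    have ea := pv_lenD strings a (by omega) (by omega)
    have eb := pv_lenD strings b (by omega) (by omega)
    simp only [pvS] at hab ⊢
    rw [ea, eb] at hab
    omega
  · have pl : (PySem.List.sorted (PySem.List.enumerate strings) (fun e => PySem.Str.len e.2)).reverse.Perm
        (PySem.List.enumerate strings) :=
      (List.reverse_perm _).trans (PySem.List.sorted_perm _ _ _)
    have p2 : (PySem.List.sorted (PySem.List.pyRange (((strings.length : Nat) : Int) - 1) (-1) (-1))
        (fun i => -(PySem.List.pyGetD (strings.map (fun s => PySem.Str.len s)) i 0))).Perm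
        (PySem.List.pyRange 0 ((strings.length : Nat) : Int)) := by
      refine (PySem.List.sorted_perm _ _ _).trans ?_
      rw [PySem.List.pyRange_neg_one_eq_reverse,
        show ((-1 : Int) + 1) = 0 by norm_num,
        show (((strings.length : Nat) : Int) - 1 + 1) = ((strings.length : Nat) : Int) by ring]
      exact List.reverse_perm _
    have p4 : (PySem.List.pyRange 0 ((strings.length : Nat) : Int)).map
        (fun i => (i, PySem.List.pyGetD strings i "")) = PySem.List.enumerate strings := by
      rw [PySem.List.enumerate_eq_map_pyRange strings ""]
      rfl
    have pr : ((PySem.List.sorted (PySem.List.pyRange (((strings.length : Nat) : Int) - 1) (-1) (-1))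
        (fun i => -(PySem.List.pyGetD (strings.map (fun s => PySem.Str.len s)) i 0))).map
          (fun i => (i, PySem.List.pyGetD strings i ""))).Perm (PySem.List.enumerate strings) := by
      rw [← p4]
      exact p2.map _
    exact pl.trans pr.symm

-- positions in pack whose char is c, ascending (what Source B's occ[c] holds)
def pvPos (pack : List Char) (c : Char) : List Int :=
  ((PySem.List.enumerate pack).filter (fun e => e.2 == c)).map (fun e => e.1)

theorem pv_mem_pvPos (pack : List Char) (c : Char) (p : Int) :
    p ∈ pvPos pack c ↔ ∃ (k : Nat) (_ : k < pack.length), p = (k : Int) ∧ pack[k] = c := by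
  simp only [pvPos, List.mem_map, List.mem_filter, PySem.List.mem_enumerate_iff]
  constructor
  · rintro ⟨e, ⟨⟨k, hk, rfl⟩, heq⟩, rfl⟩
    exact ⟨k, hk, by simp, by simpa using heq⟩
  · rintro ⟨k, hk, rfl, hc⟩
    exact ⟨((k : Int), pack[k]), ⟨⟨k, hk, by simp⟩, by simpa using hc⟩, rfl⟩

theorem pv_pairwise_pvPos (pack : List Char) (c : Char) :
    (pvPos pack c).Pairwise (· < ·) := by
  have h := PySem.List.pairwise_lt_enumerate pack 0
  have h2 := List.Pairwise.sublist (List.filter_sublist (l := PySem.List.enumerate pack)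
    (p := fun e => e.2 == c)) h
  exact List.pairwise_map.mpr h2

theorem pv_slice_eq_iff (pack s : List Char) (p : Int) (hp : 0 ≤ p) :
    (PySem.List.slice pack (some p) (some (p + (s.length : Int))) = s) ↔ s <+: pack.drop p.toNat := by
  rw [PySem.List.slice_toNat pack hp (by omega),
    show ((p + (s.length : Int)).toNat - p.toNat) = s.length by omega]
  exact ⟨fun h => List.prefix_iff_eq_take.mpr h.symm, fun h => (List.prefix_iff_eq_take.mp h).symm⟩

theorem pvScan_eq_neg_one (pack s : List Char) :
    ∀ ps : List Int, (∀ p ∈ ps, PySem.List.slice pack (some p) (some (p + (s.length : Int))) ≠ s) →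
      pvScan pack s ps = -1 := by
  intro ps
  induction ps with
  | nil => intro _; rfl
  | cons p rest ih =>
    intro h
    simp only [pvScan]
    rw [if_neg (h p List.mem_cons_self)]
    exact ih (fun q hq => h q (List.mem_cons_of_mem _ hq))

theorem pvScan_eq_of (pack s : List Char) (F : Int)
    (hmatch : PySem.List.slice pack (some F) (some (F + (s.length : Int))) = s)
    (hmin : ∀ p, 0 ≤ p → p < F → PySem.List.slice pack (some p) (some (p + (s.length : Int))) ≠ s) :
    ∀ ps : List Int, ps.Pairwise (· < ·) → F ∈ ps → (∀ p ∈ ps, 0 ≤ p) → pvScan pack s ps = F := by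
  intro ps
  induction ps with
  | nil => intro _ hF _; exact absurd hF (List.not_mem_nil)
  | cons p rest ih =>
    intro hpw hF h0
    by_cases hm : PySem.List.slice pack (some p) (some (p + (s.length : Int))) = s
    · simp only [pvScan]
      rw [if_pos hm]
      rcases List.mem_cons.mp hF with rfl | hFr
      · rfl
      · have hlt : p < F := (List.pairwise_cons.mp hpw).1 F hFr
        exact absurd hm (hmin p (h0 p List.mem_cons_self) hlt)
    · simp only [pvScan]
      rw [if_neg hm]
      have hFr : F ∈ rest := by
        rcases List.mem_cons.mp hF with rfl | h
        · exact absurd hmatch hm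
        · exact h
      exact ih (List.pairwise_cons.mp hpw).2 hFr (fun q hq => h0 q (List.mem_cons_of_mem _ hq))

-- the first-char index scan computes exactly Python's pack.find(s) for nonempty s
theorem pvScan_eq_find (pack : List Char) (c : Char) (t : List Char) :
    pvScan pack (c :: t) (pvPos pack c) = PySem.Chars.find pack (c :: t) := by
  by_cases hF : PySem.Chars.find pack (c :: t) = -1
  · rw [hF]
    apply pvScan_eq_neg_one
    intro p hp hcon
    obtain ⟨k, hk, rfl, hc⟩ := (pv_mem_pvPos pack c p).mp hp
    have hpre : (c :: t) <+: pack.drop ((k : Int)).toNat :=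
      (pv_slice_eq_iff pack (c :: t) _ (by positivity)).mp hcon
    have hin : PySem.Chars.isIn (c :: t) pack = true :=
      (PySem.Chars.exists_prefix_drop_iff_isIn _ _).mp ⟨_, hpre⟩
    exact (PySem.Chars.find_eq_neg_one_iff pack (c :: t)).mp hF ((PySem.Chars.isIn_iff_infix _ _).mp hin)
  · have hF0 : 0 ≤ PySem.Chars.find pack (c :: t) := by
      have := PySem.Chars.neg_one_le_find pack (c :: t); omega
    obtain ⟨hpre, hmin⟩ := PySem.Chars.find_spec hF0
    obtain ⟨u, hu⟩ := hpre
    have hd : pack.drop (PySem.Chars.find pack (c :: t)).toNat = c :: (t ++ u) := by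
      rw [← hu]; simp
    have hklen : (PySem.Chars.find pack (c :: t)).toNat < pack.length := by
      by_contra hge
      rw [List.drop_eq_nil_of_le (by omega)] at hd
      cases hd
    have hgc : pack[(PySem.Chars.find pack (c :: t)).toNat] = c := by
      have h9 : pack[(PySem.Chars.find pack (c :: t)).toNat]? = some c := by
        have h10 : (List.drop (PySem.Chars.find pack (c :: t)).toNat pack)[(0 : Nat)]?
            = pack[(PySem.Chars.find pack (c :: t)).toNat + 0]? := List.getElem?_drop
        rw [hd] at h10
        simpa using h10.symm
      simpa [List.getElem?_eq_getElem hklen] using h9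
    apply pvScan_eq_of
    · exact (pv_slice_eq_iff pack (c :: t) _ hF0).mpr ⟨u, hu⟩
    · intro p hp0 hpF hcon
      exact hmin p.toNat (by omega) ((pv_slice_eq_iff pack (c :: t) p hp0).mp hcon)
    · exact pv_pairwise_pvPos pack c
    · exact (pv_mem_pvPos pack c _).mpr ⟨_, hklen, by omega, hgc⟩
    · intro p hp
      obtain ⟨k, _, rfl, _⟩ := (pv_mem_pvPos pack c p).mp hp
      positivity

theorem pv_enumerate_shift {α : Type} (xs : List α) :
    ∀ (s k : Int), PySem.List.enumerate xs (s + k)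
      = (PySem.List.enumerate xs k).map (fun e => (s + e.1, e.2)) := by
  induction xs with
  | nil => intro s k; simp
  | cons x xs ih =>
    intro s k
    simp only [PySem.List.enumerate_cons, List.map_cons]
    rw [show s + k + 1 = s + (k + 1) by ring, ih]

theorem pv_occ_update (sl packB : List Char) (occ : PySem.Dict Char (List Int))
    (h3 : ∀ c, occ.getD c [] = pvPos packB c) (c' : Char) :
    ((PySem.List.enumerate sl).foldl
        (fun d jc => PySem.Dict.modify d jc.2 [] (fun v => v ++ [(packB.length : Int) + jc.1])) occ).getD c' []
      = pvPos (packB ++ sl) c' := by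
  have key := PySem.Dict.getD_foldl_modify_append
    ((PySem.List.enumerate sl).map (fun jc => (jc.2, (packB.length : Int) + jc.1))) occ c'
  rw [List.foldl_map] at key
  simp only at key
  rw [key, h3]
  simp only [pvPos, PySem.List.enumerate_append,
    show ((0 : Int) + (packB.length : Int)) = ((packB.length : Int) + 0) by ring,
    pv_enumerate_shift sl (packB.length : Int) 0,
    List.filter_append, List.map_append, List.filter_map, List.map_map]
  simp [Function.comp_def]

theorem pv_step (strings : List String) (i : Int) (ind : List Int) (packA : String)
    (packB : List Char) (occ : PySem.Dict Char (List Int))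
    (h2 : packA.toList = packB) (h3 : ∀ c, occ.getD c [] = pvPos packB c) :
    (pvStepA (ind, packA) (i, PySem.List.pyGetD strings i "")).1 = (pvStepB strings (ind, packB, occ) i).1
    ∧ (pvStepA (ind, packA) (i, PySem.List.pyGetD strings i "")).2.toList = (pvStepB strings (ind, packB, occ) i).2.1
    ∧ ∀ c, ((pvStepB strings (ind, packB, occ) i).2.2).getD c []
        = pvPos ((pvStepB strings (ind, packB, occ) i).2.1) c := by
  subst h2
  rcases hsl : (PySem.List.pyGetD strings i "").toList with _ | ⟨c, t⟩
  · have hfind : PySem.Str.find packA (PySem.List.pyGetD strings i "") = 0 := by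
      rw [PySem.Str.find_eq, hsl, PySem.Chars.find_nil]
    have hrwA : pvStepA (ind, packA) (i, PySem.List.pyGetD strings i "")
        = (PySem.List.pySetD ind i 0, packA) := by
      simp only [pvStepA]
      rw [hfind]
      simp
    have hrwB : pvStepB strings (ind, packA.toList, occ) i
        = (PySem.List.pySetD ind i 0, packA.toList, occ) := by
      simp only [pvStepB]
      rw [hsl]
    rw [hrwA, hrwB]
    exact ⟨rfl, rfl, fun c' => h3 c'⟩
  · have hfind : PySem.Str.find packA (PySem.List.pyGetD strings i "")
        = PySem.Chars.find packA.toList (c :: t) := by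
      rw [PySem.Str.find_eq, hsl]
    have hscanPos : pvScan packA.toList (c :: t) (pvPos packA.toList c)
        = PySem.Chars.find packA.toList (c :: t) := pvScan_eq_find _ _ _
    have hscanOcc : pvScan packA.toList (c :: t) (occ.getD c [])
        = PySem.Chars.find packA.toList (c :: t) := by
      rw [h3 c]; exact hscanPos
    by_cases hF : PySem.Chars.find packA.toList (c :: t) = -1
    · have hrwA : pvStepA (ind, packA) (i, PySem.List.pyGetD strings i "")
          = (PySem.List.pySetD ind i (PySem.Str.len packA),
             packA ++ PySem.List.pyGetD strings i "") := by
        simp only [pvStepA]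
        rw [hfind, if_pos hF]
      have hrwB : pvStepB strings (ind, packA.toList, occ) i
          = (PySem.List.pySetD ind i ((packA.toList.length : Int)), packA.toList ++ (c :: t),
             (PySem.List.enumerate (c :: t)).foldl
               (fun d jc => PySem.Dict.modify d jc.2 []
                 (fun v => v ++ [((packA.toList.length : Int)) + jc.1])) occ) := by
        simp only [pvStepB, hsl]
        rw [hscanOcc, if_pos hF]
      rw [hrwA, hrwB]
      refine ⟨?_, ?_, ?_⟩
      · simp [PySem.Str.len_eq]
      · simp [hsl]
      · intro c'
        exact pv_occ_update (c :: t) packA.toList occ h3 c'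
    · have hrwA : pvStepA (ind, packA) (i, PySem.List.pyGetD strings i "")
          = (PySem.List.pySetD ind i (PySem.Chars.find packA.toList (c :: t)), packA) := by
        simp only [pvStepA]
        rw [hfind, if_neg hF]
      have hrwB : pvStepB strings (ind, packA.toList, occ) i
          = (PySem.List.pySetD ind i (PySem.Chars.find packA.toList (c :: t)),
             packA.toList, occ) := by
        simp only [pvStepB, hsl]
        rw [hscanOcc, if_neg hF]
      rw [hrwA, hrwB]
      exact ⟨rfl, rfl, fun c' => h3 c'⟩

theorem pv_loop (strings : List String) :
    ∀ (is : List Int) (indA indB : List Int) (packA : String) (packB : List Char)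
      (occ : PySem.Dict Char (List Int)),
      indA = indB → packA.toList = packB → (∀ c, occ.getD c [] = pvPos packB c) →
      ((is.map (fun i => (i, PySem.List.pyGetD strings i ""))).foldl pvStepA (indA, packA)).1
          = (is.foldl (pvStepB strings) (indB, packB, occ)).1
      ∧ ((is.map (fun i => (i, PySem.List.pyGetD strings i ""))).foldl pvStepA (indA, packA)).2.toList
          = (is.foldl (pvStepB strings) (indB, packB, occ)).2.1 := by
  intro is
  induction is with
  | nil =>
    intro indA indB packA packB occ h1 h2 _
    subst h1
    exact ⟨rfl, h2⟩
  | cons i rest ih =>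
    intro indA indB packA packB occ h1 h2 h3
    subst h1
    obtain ⟨e1, e2, e3⟩ := pv_step strings i indA packA packB occ h2 h3
    simp only [List.map_cons, List.foldl_cons]
    exact ih _ _ _ _ _ e1 e2 e3

-- ===== VERDICT (by name: the statement is the Claim_ definition above) =====
theorem pack_strings_spec : Claim_equal_pack_strings := by
  intro strings _
  unfold Spec_pack_strings pack_strings pack_strings_alt
  simp only []
  rw [pv_order strings]
  have hrep : strings.map (fun _ => (0 : Int)) = List.replicate strings.length 0 := by
    simp [List.map_const']
  obtain ⟨hind, hpack⟩ := pv_loop strings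
    (PySem.List.sorted (PySem.List.pyRange (((strings.length : Nat) : Int) - 1) (-1) (-1))
      (fun i => -(PySem.List.pyGetD (strings.map (fun s => PySem.Str.len s)) i 0)))
    (strings.map (fun _ => (0 : Int))) (List.replicate strings.length 0) "" []
    PySem.Dict.empty hrep rfl (by intro c; simp [PySem.Dict.getD_empty, pvPos])
  rw [Prod.mk.injEq, Prod.mk.injEq]
  refine ⟨hind, rfl, ?_⟩
  rw [← hpack]
  exact String.ofList_toList.symm
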